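-- pv_equiv track=rewrite | github.com/swcarpentry/DEPRECATED-boot-camps | python/sw_engineering/animals.py | filter_animals
-- ===== SOURCE A (Python) =====
-- def filter_animals(kind, date, time, species, count):
--     fdate = []
--     ftime = []
--     fspecies = []
--     fcount = []
--
--     for i in range(len(date)):
--         if species[i] == kind:
--             fdate.append(date[i])
--             ftime.append(time[i])
--             fspecies.append(species[i])
--             fcount.append(count[i])
--
--     return fdate, ftime, fspecies, fcount
-- ===== SOURCE B (Python) =====
-- def filter_animals(kind, date, time, species, count):
--     idx = [i for i in range(len(date)) if species[i] == kind]
--     fdate = [date[i] for i in idx]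
--     ftime = [time[i] for i in idx]
--     fspecies = [species[i] for i in idx]
--     fcount = [count[i] for i in idx]
--     return fdate, ftime, fspecies, fcount
-- ===== Notes on version B (the rewrite author's own statement) =====
-- stated objective: alternative
-- what changed: B first computes the list of matching index positions once, then gathers each of the four output columns by mapping over that index list, instead of A's single loop that conditionally appends to four accumulators.
import Mathlib
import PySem

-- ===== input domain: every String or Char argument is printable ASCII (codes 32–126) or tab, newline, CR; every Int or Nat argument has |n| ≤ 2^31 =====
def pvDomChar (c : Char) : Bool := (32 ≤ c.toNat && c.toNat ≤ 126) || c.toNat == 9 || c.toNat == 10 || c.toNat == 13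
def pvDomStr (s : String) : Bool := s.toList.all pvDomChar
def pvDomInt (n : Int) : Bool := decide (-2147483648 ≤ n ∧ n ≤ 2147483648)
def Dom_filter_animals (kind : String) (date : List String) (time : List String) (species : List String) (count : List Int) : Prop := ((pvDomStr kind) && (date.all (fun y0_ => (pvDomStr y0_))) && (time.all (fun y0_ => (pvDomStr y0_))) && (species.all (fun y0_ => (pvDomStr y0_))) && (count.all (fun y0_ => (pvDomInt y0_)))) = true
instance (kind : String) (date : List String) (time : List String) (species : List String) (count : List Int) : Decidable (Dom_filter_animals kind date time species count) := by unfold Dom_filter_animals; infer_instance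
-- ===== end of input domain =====

-- B restructures A's single conditional-append loop into an index-then-gather decomposition (alternative, same cost).


-- ===== PORT A =====
-- Port of A: one loop over range(len(date)) conditionally appending to four accumulators.
-- Indexing uses getD; Pre_ restricts the claim to inputs where the Python never raises IndexError.
def filter_animals (kind : String) (date : List String) (time : List String) (species : List String) (count : List Int) : List String × List String × List String × List Int :=
  (List.range date.length).foldl
    (fun (acc : List String × List String × List String × List Int) i =>
      if species.getD i "" = kind then
        (acc.1 ++ [date.getD i ""], acc.2.1 ++ [time.getD i ""],
         acc.2.2.1 ++ [species.getD i ""], acc.2.2.2 ++ [count.getD i 0])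
      else acc)
    ([], [], [], [])

-- ===== PORT B =====
-- Port of B: compute the matching index list once, then gather each column by mapping over it.
def filter_animals_alt (kind : String) (date : List String) (time : List String) (species : List String) (count : List Int) : List String × List String × List String × List Int :=
  let idx := (List.range date.length).filter (fun i => species.getD i "" = kind)
  (idx.map (fun i => date.getD i ""), idx.map (fun i => time.getD i ""),
   idx.map (fun i => species.getD i ""), idx.map (fun i => count.getD i 0))

-- ===== PRECONDITION & SPEC =====
-- Pre_ excludes exactly the mismatched-length inputs on which Python A raises IndexError
-- (species shorter than date, or a matching index beyond time/count).
def Pre_filter_animals (kind : String) (date : List String) (time : List String) (species : List String) (count : List Int) : Prop :=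
  date.length ≤ species.length ∧
  ∀ i ∈ List.range date.length, species.getD i "" = kind → i < time.length ∧ i < count.length
instance (kind : String) (date : List String) (time : List String) (species : List String) (count : List Int) : Decidable (Pre_filter_animals kind date time species count) := by unfold Pre_filter_animals; infer_instance
def pvWitness_filter_animals : String × List String × List String × List String × List Int :=
  ("fox", ["2011-04-22", "2011-04-23"], ["21:06", "14:12"], ["rabbit", "fox"], [3, 5])
def Spec_filter_animals (kind : String) (date : List String) (time : List String) (species : List String) (count : List Int) (out : List String × List String × List String × List Int) : Prop := out = filter_animals_alt kind date time species count
instance (kind : String) (date : List String) (time : List String) (species : List String) (count : List Int) (out : List String × List String × List String × List Int) : Decidable (Spec_filter_animals kind date time species count out) := by unfold Spec_filter_animals; infer_instance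

-- ===== CLAIM (what is proved, stated in full; the proofs are below) =====
def Claim_equal_filter_animals : Prop := ∀ (kind : String) (date : List String) (time : List String) (species : List String) (count : List Int), Dom_filter_animals kind date time species count → Pre_filter_animals kind date time species count → Spec_filter_animals kind date time species count (filter_animals kind date time species count)

-- ===== LEMMAS AND PROOFS =====

lemma foldl_append4_eq_map_filter (p : Nat → Prop) [DecidablePred p]
    (g1 g2 g3 : Nat → String) (g4 : Nat → Int) :
    ∀ (l : List Nat) (a b c : List String) (d : List Int),
      l.foldl
        (fun (acc : List String × List String × List String × List Int) i =>
          if p i then (acc.1 ++ [g1 i], acc.2.1 ++ [g2 i], acc.2.2.1 ++ [g3 i], acc.2.2.2 ++ [g4 i])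
          else acc)
        (a, b, c, d)
      = (a ++ (l.filter (fun i => p i)).map g1, b ++ (l.filter (fun i => p i)).map g2,
         c ++ (l.filter (fun i => p i)).map g3, d ++ (l.filter (fun i => p i)).map g4) := by
  intro l
  induction l with
  | nil => intro a b c d; simp
  | cons hd tl ih =>
    intro a b c d
    by_cases h : p hd <;> simp [h, ih]

-- ===== VERDICT (by name: the statement is the Claim_ definition above) =====
theorem filter_animals_spec : Claim_equal_filter_animals := by
  intro kind date time species count _ _
  unfold Spec_filter_animals filter_animals filter_animals_alt
  rw [foldl_append4_eq_map_filter (fun i => species.getD i "" = kind)]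
  simp
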